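-- pv_equiv track=rewrite | github.com/noooey/solved | Codility/StrSymmetryPoint.py | solution
-- ===== SOURCE A (Python) =====
-- def solution(S):
--     l = len(S)
--     if l % 2 == 0:
--         return -1
--     elif l == 1:
--         return 0
--     else:
--         for i in range(l//2):
--             if S[i] != S[-(i+1)]:
--                 return -1
--         return l//2
-- ===== SOURCE B (Python) =====
-- def solution(S):
--     if len(S) % 2 == 0:
--         return -1
--     return len(S) // 2 if S == S[::-1] else -1
-- ===== Notes on version B (the rewrite author's own statement) =====
-- stated objective: idiomatic
-- what changed: Replaces the manual two-pointer index loop (with early return on the first mismatch and a special l==1 branch) by building the reversed string S[::-1] and one whole-string equality test; the length-1 case falls out of l//2 = 0.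
import Mathlib
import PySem

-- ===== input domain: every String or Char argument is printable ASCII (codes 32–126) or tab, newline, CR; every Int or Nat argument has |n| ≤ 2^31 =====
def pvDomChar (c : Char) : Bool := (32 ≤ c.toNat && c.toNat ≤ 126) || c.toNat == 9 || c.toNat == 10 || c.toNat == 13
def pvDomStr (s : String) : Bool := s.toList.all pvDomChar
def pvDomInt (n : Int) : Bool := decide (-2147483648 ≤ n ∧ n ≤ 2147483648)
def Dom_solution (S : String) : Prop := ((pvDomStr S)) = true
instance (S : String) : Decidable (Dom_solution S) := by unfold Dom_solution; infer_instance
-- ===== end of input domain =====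

-- B replaces A's two-pointer index loop (with its special l == 1 branch) by one
-- reversed copy S[::-1] and a whole-string equality test (idiomatic; same cost).

-- ===== PORT A =====
-- the for-loop: the first index with S[i] != S[-(i+1)] returns -1, otherwise l//2.
-- Both indices are always in range here, so pyGet? never yields none; comparing
-- the Options is exactly Python's S[i] != S[-(i+1)].
def solutionGo (cs : List Char) (l : Int) : List Int → Int
  | [] => PySem.Int.floordiv l 2
  | i :: rest =>
      if PySem.List.pyGet? cs i ≠ PySem.List.pyGet? cs (-(i + 1)) then -1
      else solutionGo cs l rest

def solution (S : String) : Int :=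
  let cs := S.toList
  let l : Int := cs.length
  if PySem.Int.mod l 2 = 0 then -1
  else if l = 1 then 0
  else solutionGo cs l (PySem.List.pyRange 0 (PySem.Int.floordiv l 2) 1)

-- ===== PORT B =====
-- S[::-1]: slice? with step -1 is always `some` (step ≠ 0), so getD [] is exact.
def solution_alt (S : String) : Int :=
  let cs := S.toList
  let l : Int := cs.length
  if PySem.Int.mod l 2 = 0 then -1
  else if cs = (PySem.List.slice? cs none none (-1)).getD [] then PySem.Int.floordiv l 2
  else -1

-- ===== PRECONDITION & SPEC =====
def Spec_solution (S : String) (out : Int) : Prop := out = solution_alt S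
instance (S : String) (out : Int) : Decidable (Spec_solution S out) := by unfold Spec_solution; infer_instance

-- ===== CLAIM (what is proved, stated in full; the proofs are below) =====
def Claim_equal_solution : Prop := ∀ (S : String), Dom_solution S → Spec_solution S (solution S)

-- ===== LEMMAS AND PROOFS =====

-- A's loop returns l//2 iff every index in the list passes the mirror test.
theorem solutionGo_eq (cs : List Char) (l : Int) (is : List Int) :
    solutionGo cs l is =
      if ∀ i ∈ is, PySem.List.pyGet? cs i = PySem.List.pyGet? cs (-(i + 1)) then
        PySem.Int.floordiv l 2
      else -1 := by
  induction is with
  | nil => simp [solutionGo]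
  | cons i rest ih =>
    rw [solutionGo]
    by_cases h : PySem.List.pyGet? cs i = PySem.List.pyGet? cs (-(i + 1))
    · rw [if_neg (by simpa using h), ih]
      by_cases hr : ∀ a ∈ rest, PySem.List.pyGet? cs a = PySem.List.pyGet? cs (-(a + 1))
      · rw [if_pos hr, if_pos (by simpa [List.forall_mem_cons] using And.intro h hr)]
      · rw [if_neg hr, if_neg (by rw [List.forall_mem_cons]; exact fun ⟨_, h2⟩ => hr h2)]
    · rw [if_pos (by simpa using h), if_neg (by rw [List.forall_mem_cons]; exact fun ⟨h1, _⟩ => h h1)]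

-- palindrome characterisation: equality with the reverse ↔ the first half mirrors.
theorem reverse_iff_half (cs : List Char) :
    cs = cs.reverse ↔
      (∀ k, k < cs.length / 2 → cs[k]? = cs[cs.length - 1 - k]?) := by
  constructor
  · intro h k hk
    conv_lhs => rw [h]
    rw [List.getElem?_reverse (by omega)]
  · intro h
    apply List.ext_getElem (by simp)
    intro k hk hk'
    rw [List.getElem_reverse]
    by_cases h1 : k < cs.length / 2
    · have hq := h k h1
      rw [List.getElem?_eq_getElem hk, List.getElem?_eq_getElem (by omega)] at hq
      exact Option.some.inj hq
    · by_cases h2 : cs.length - 1 - k < cs.length / 2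
      · have hq := h _ h2
        have he : cs.length - 1 - (cs.length - 1 - k) = k := by omega
        rw [he] at hq
        rw [List.getElem?_eq_getElem (by omega), List.getElem?_eq_getElem hk] at hq
        exact (Option.some.inj hq).symm
      · have hkk : k = cs.length - 1 - k := by omega
        have hq : cs[k]? = cs[cs.length - 1 - k]? := by rw [← hkk]
        rw [List.getElem?_eq_getElem hk, List.getElem?_eq_getElem (by omega)] at hq
        exact Option.some.inj hq

-- the range-loop mirror test is the Nat-level half characterisation
theorem range_mirror_iff (cs : List Char) :
    (∀ i ∈ PySem.List.pyRange 0 (PySem.Int.floordiv (cs.length : Int) 2) 1,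
        PySem.List.pyGet? cs i = PySem.List.pyGet? cs (-(i + 1))) ↔
      (∀ k, k < cs.length / 2 → cs[k]? = cs[cs.length - 1 - k]?) := by
  have hfd : PySem.Int.floordiv (cs.length : Int) 2 = ((cs.length / 2 : Nat) : Int) := by
    exact_mod_cast PySem.Int.floordiv_natCast cs.length 2
  have hsub : ∀ k : Nat, cs.length - (k + 1) = cs.length - 1 - k := by omega
  constructor
  · intro h k hk
    have hm : ((k : Int)) ∈ PySem.List.pyRange 0 (PySem.Int.floordiv (cs.length : Int) 2) 1 := by
      rw [PySem.List.mem_pyRange_one, hfd]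
      exact ⟨by positivity, by exact_mod_cast hk⟩
    have hq := h _ hm
    have hneg : (-((k : Int) + 1)) = -(((k + 1 : Nat) : Int)) := by push_cast; ring
    rw [PySem.List.pyGet?_natCast, hneg,
      PySem.List.pyGet?_neg_natCast cs (k + 1) (by omega) (by omega), hsub k] at hq
    exact hq
  · intro h i hi
    rw [PySem.List.mem_pyRange_one, hfd] at hi
    obtain ⟨h0, h1⟩ := hi
    obtain ⟨k, rfl⟩ := Int.eq_ofNat_of_zero_le h0
    have hk : k < cs.length / 2 := by exact_mod_cast h1
    have hneg : (-((k : Int) + 1)) = -(((k + 1 : Nat) : Int)) := by push_cast; ring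
    rw [PySem.List.pyGet?_natCast, hneg,
      PySem.List.pyGet?_neg_natCast cs (k + 1) (by omega) (by omega), hsub k]
    exact h k hk

-- ===== VERDICT (by name: the statement is the Claim_ definition above) =====
theorem solution_spec : Claim_equal_solution := by
  intro S _
  unfold Spec_solution solution solution_alt
  simp only [PySem.List.slice?_none_none_neg_one, Option.getD_some]
  set cs := S.toList with hcs
  by_cases he : PySem.Int.mod ((cs.length : Int)) 2 = 0
  · rw [if_pos he, if_pos he]
  · rw [if_neg he, if_neg he]
    have hcond : (∀ i ∈ PySem.List.pyRange 0 (PySem.Int.floordiv (cs.length : Int) 2) 1,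
          PySem.List.pyGet? cs i = PySem.List.pyGet? cs (-(i + 1))) ↔ cs = cs.reverse :=
      (range_mirror_iff cs).trans (reverse_iff_half cs).symm
    by_cases h1 : (cs.length : Int) = 1
    · have hl1 : cs.length = 1 := by exact_mod_cast h1
      have hpal : cs = cs.reverse := (reverse_iff_half cs).mpr (by intro k hk; exact absurd hk (by omega))
      rw [if_pos h1, if_pos hpal, h1]
      decide
    · rw [if_neg h1, solutionGo_eq]
      by_cases hp : cs = cs.reverse
      · rw [if_pos (hcond.mpr hp), if_pos hp]
      · rw [if_neg (fun hh => hp (hcond.mp hh)), if_neg hp]
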